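-- pv_equiv track=rewrite | github.com/PeteMango/Contest | Online Assessment/Seven Eight Capital F24/smart_sale.py | deleteProducts
-- ===== SOURCE A (Python) =====
-- from collections import defaultdict
--
-- def deleteProducts(ids, m):
--     d = defaultdict(int)
--     for num in ids:
--         d[num] += 1
--
--     unique = len(d)
--     freq = []
--     for key, val in d.items():
--         freq.append(val)
--
--     freq.sort()
--     for i in range(len(freq)):
--         if m >= freq[i]:
--             unique -= 1
--             m -= freq[i]
--     return unique
-- ===== SOURCE B (Python) =====
-- from collections import Counter
--
-- def deleteProducts(ids, m):
--     cnt = Counter(ids)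
--     n = len(ids)
--     bucket = [0] * (n + 1)          # counting sort: bucket[c] = number of ids occurring exactly c times
--     for v in cnt.values():
--         bucket[v] += 1
--     unique = len(cnt)
--     for c in range(1, n + 1):
--         if c > m:
--             break
--         k = min(bucket[c], m // c)
--         unique -= k
--         m -= k * c
--     return unique
-- ===== Notes on version B (the rewrite author's own statement) =====
-- stated objective: faster
-- what changed: Replaces the comparison sort of the frequency list and the per-element greedy scan by a counting-sort bucket array over frequency values (bounded by n), removing whole buckets at once with integer division.
import Mathlib
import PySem

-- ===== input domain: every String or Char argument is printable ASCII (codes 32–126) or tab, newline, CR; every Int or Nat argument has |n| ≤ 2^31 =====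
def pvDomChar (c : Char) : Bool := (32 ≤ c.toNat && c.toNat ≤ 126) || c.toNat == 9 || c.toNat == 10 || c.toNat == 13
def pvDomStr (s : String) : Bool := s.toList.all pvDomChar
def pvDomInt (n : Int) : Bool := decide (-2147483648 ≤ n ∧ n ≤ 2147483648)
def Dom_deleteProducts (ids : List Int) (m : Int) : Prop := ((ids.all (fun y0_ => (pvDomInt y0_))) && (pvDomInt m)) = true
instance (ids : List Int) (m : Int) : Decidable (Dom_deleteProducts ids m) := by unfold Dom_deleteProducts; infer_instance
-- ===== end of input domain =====

-- B replaces A's comparison sort + per-element greedy scan by a counting-sort bucket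
-- over frequency values, removing whole buckets at once (asymptotically faster).

-- ===== PORT A =====
-- literal transliteration of A: counter dict, collect values, sort, greedy scan by index
def deleteProducts (ids : List Int) (m : Int) : Int :=
  let d : PySem.Dict Int Int :=
    ids.foldl (fun d num => d.modify num 0 (· + 1)) PySem.Dict.empty
  let unique : Int := d.size
  let freq : List Int := d.items.foldl (fun acc kv => acc ++ [kv.2]) []
  let sfreq := PySem.List.sorted freq (fun x => x) false
  -- for i in range(len(freq)): freq[i] (always in range)
  ((PySem.List.pyRange 0 (sfreq.length : Int) 1).foldl
      (fun (st : Int × Int) i =>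
        let f := PySem.List.pyGetD sfreq i 0
        if st.2 ≥ f then (st.1 - 1, st.2 - f) else st)
      (unique, m)).1

-- ===== PORT B =====
-- bucket[v] += 1 over the counter's values; v is a count, so 1 ≤ v ≤ n and v.toNat is exact
def pvBucketFill : List Int → List Int → List Int
  | [], b => b
  | v :: vs, b => pvBucketFill vs (b.set v.toNat (b.getD v.toNat 0 + 1))

-- for c in range(1, n+1): break when c > m; bucket[c] is in range (1 ≤ c ≤ n, len = n+1)
def pvBuyLoop : List Int → List Int → Int → Int → Int
  | [], _, unique, _ => unique
  | c :: cs, bucket, unique, m =>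
    if c > m then unique
    else
      let k := min (bucket.getD c.toNat 0) (PySem.Int.floordiv m c)
      pvBuyLoop cs bucket (unique - k) (m - k * c)

def deleteProducts_alt (ids : List Int) (m : Int) : Int :=
  let cnt := PySem.Dict.counter ids
  let n := ids.length
  let bucket := pvBucketFill cnt.values (List.replicate (n + 1) 0)
  let unique : Int := cnt.size
  pvBuyLoop (PySem.List.pyRange 1 ((n : Int) + 1) 1) bucket unique m

-- ===== PRECONDITION & SPEC =====
def Spec_deleteProducts (ids : List Int) (m : Int) (out : Int) : Prop := out = deleteProducts_alt ids m
instance (ids : List Int) (m : Int) (out : Int) : Decidable (Spec_deleteProducts ids m out) := by unfold Spec_deleteProducts; infer_instance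

-- ===== CLAIM (what is proved, stated in full; the proofs are below) =====
def Claim_equal_deleteProducts : Prop := ∀ (ids : List Int) (m : Int), Dom_deleteProducts ids m → Spec_deleteProducts ids m (deleteProducts ids m)

-- ===== LEMMAS AND PROOFS =====

-- A's greedy step over the sorted frequency list
def pvStep (st : Int × Int) (f : Int) : Int × Int :=
  if st.2 ≥ f then (st.1 - 1, st.2 - f) else st

-- canonical counting-sorted list: a block of copies of each value lo, lo+1, …, lo+len-1
def pvCanon (lo len : Nat) (vals : List Int) : List Int :=
  (List.range' lo len).flatMap (fun c => List.replicate (vals.count (Nat.cast c)) (Nat.cast c))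

theorem pvFoldlAppendSnd (l : List (Int × Int)) (acc : List Int) :
    l.foldl (fun acc kv => acc ++ [kv.2]) acc = acc ++ l.map (·.2) := by
  induction l generalizing acc with
  | nil => simp
  | cons p t ih => simp [ih]

theorem pvStep_id (l : List Int) (u m : Int) (h : ∀ f ∈ l, m < f) :
    l.foldl pvStep (u, m) = (u, m) := by
  induction l with
  | nil => rfl
  | cons f t ih =>
    have hf := h f (by simp)
    have h1 : pvStep (u, m) f = (u, m) := by
      simp only [pvStep]; rw [if_neg (by simp; omega)]
    rw [List.foldl_cons, h1, ih (fun g hg => h g (by simp [hg]))]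

theorem pvL2 (c : Int) (hc : 1 ≤ c) (k : Nat) : ∀ (rest : List Int) (u m : Int), 0 ≤ m →
    (List.replicate k c ++ rest).foldl pvStep (u, m)
      = rest.foldl pvStep (u - min (k : Int) (m / c), m - min (k : Int) (m / c) * c) := by
  induction k with
  | zero =>
    intro rest u m hm
    have h0 : (0 : Int) ≤ m / c := Int.ediv_nonneg hm (by omega)
    have hmin : min ((0 : Nat) : Int) (m / c) = 0 := by push_cast; omega
    rw [hmin, List.replicate_zero, List.nil_append]
    norm_num
  | succ k ih =>
    intro rest u m hm
    rw [List.replicate_succ, List.cons_append, List.foldl_cons]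
    by_cases hmc : m ≥ c
    · have hq1 : (1 : Int) ≤ m / c := by
        rw [Int.le_ediv_iff_mul_le (by omega)]; omega
      have h1 : (m - c + 1 * c) / c = (m - c) / c + 1 :=
        Int.add_mul_ediv_right _ _ (by omega)
      have h2 : m - c + 1 * c = m := by ring
      rw [h2] at h1
      have hstep : pvStep (u, m) c = (u - 1, m - c) := by
        simp only [pvStep]; rw [if_pos (by simp; omega)]
      rw [hstep, ih rest (u - 1) (m - c) (by omega)]
      have hmin : min ((k : Int)) ((m - c) / c) = min ((k + 1 : Nat) : Int) (m / c) - 1 := by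
        push_cast; omega
      rw [hmin]
      congr 1
      exact Prod.ext_iff.mpr ⟨by ring, by ring⟩
    · have hq0 : m / c = 0 := Int.ediv_eq_zero_of_lt hm (by omega)
      have hstep : pvStep (u, m) c = (u, m) := by
        simp only [pvStep]; rw [if_neg (by simp; omega)]
      rw [hstep, ih rest u m hm, hq0]
      have e1 : min ((k : Int)) (0 : Int) = 0 := by omega
      have e2 : min (((k + 1 : Nat)) : Int) (0 : Int) = 0 := by push_cast; omega
      rw [e1, e2]

theorem pvMemCanon (lo len : Nat) (vals : List Int) (x : Int) (hx : x ∈ pvCanon lo len vals) :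
    (lo : Int) ≤ x ∧ x < (lo : Int) + len := by
  induction len generalizing lo with
  | zero => simp [pvCanon] at hx
  | succ len ih =>
    rw [pvCanon, List.range'_succ, List.flatMap_cons] at hx
    rw [List.mem_append] at hx
    rcases hx with hx | hx
    · have := List.eq_of_mem_replicate hx
      subst this; push_cast; omega
    · have := ih (lo + 1) hx
      push_cast at this ⊢; omega

theorem pvCountCanon (len : Nat) : ∀ (lo : Nat) (vals : List Int) (x : Int),
    (pvCanon lo len vals).count x
      = if (lo : Int) ≤ x ∧ x < (lo : Int) + len then vals.count x else 0 := by
  induction len with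
  | zero =>
    intro lo vals x
    rw [if_neg (by push_cast; omega)]
    simp [pvCanon]
  | succ len ih =>
    intro lo vals x
    rw [pvCanon, List.range'_succ, List.flatMap_cons, List.count_append]
    have ih' := ih (lo + 1) vals x
    rw [pvCanon] at ih'
    rw [ih']
    simp only [List.count_replicate, beq_iff_eq]
    by_cases hx : x = (lo : Int)
    · subst hx
      rw [if_pos rfl, if_neg (by push_cast; omega), if_pos (by push_cast; omega)]
      omega
    · rw [if_neg (by omega)]
      by_cases hx2 : ((lo : Int) + 1 ≤ x ∧ x < ((lo : Int)) + 1 + len)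
      · rw [if_pos (by push_cast at hx2 ⊢; omega), if_pos (by push_cast at hx2 ⊢; omega)]
        omega
      · rw [if_neg (by push_cast at hx2 ⊢; omega), if_neg (by push_cast at hx2 ⊢; omega)]

theorem pvReplicatePairwise (k : Nat) (c : Int) :
    (List.replicate k c).Pairwise (· ≤ ·) := by
  induction k with
  | zero => simp
  | succ k ih =>
    rw [List.replicate_succ, List.pairwise_cons]
    exact ⟨fun b hb => le_of_eq (List.eq_of_mem_replicate hb).symm, ih⟩

theorem pvCanonPairwise (len : Nat) : ∀ (lo : Nat) (vals : List Int),
    (pvCanon lo len vals).Pairwise (· ≤ ·) := by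
  induction len with
  | zero => intro lo vals; simp [pvCanon]
  | succ len ih =>
    intro lo vals
    rw [pvCanon, List.range'_succ, List.flatMap_cons]
    rw [List.pairwise_append]
    refine ⟨pvReplicatePairwise _ _, ?_, ?_⟩
    · have := ih (lo + 1) vals
      rw [pvCanon] at this
      exact this
    · intro a ha b hb
      have ha' := List.eq_of_mem_replicate ha
      have hb' : ((lo + 1 : Nat) : Int) ≤ b ∧ b < ((lo + 1 : Nat) : Int) + len := by
        apply pvMemCanon (lo + 1) len vals b
        rw [pvCanon]
        exact hb
      subst ha'
      push_cast at hb' ⊢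
      omega

theorem pvSortedEqCanon (n : Nat) (vals : List Int)
    (hv : ∀ v ∈ vals, 1 ≤ v ∧ v ≤ (n : Int)) :
    PySem.List.sorted vals (fun x => x) false = pvCanon 1 n vals := by
  apply PySem.List.sorted_id_eq_of_perm_of_pairwise
  · rw [List.perm_iff_count]
    intro x
    rw [pvCountCanon]
    split_ifs with h
    · rfl
    · symm
      rw [List.count_eq_zero]
      intro hx
      have := hv x hx
      push_cast at h; omega
  · exact pvCanonPairwise n 1 vals

theorem pvGetDSetSelf (b : List Int) (j : Nat) (x : Int) (hj : j < b.length) :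
    (b.set j x).getD j 0 = x := by
  simp [List.getD_eq_getElem?_getD, hj]

theorem pvGetDSetNe (b : List Int) (i j : Nat) (x : Int) (h : i ≠ j) :
    (b.set i x).getD j 0 = b.getD j 0 := by
  simp [List.getD_eq_getElem?_getD, h]

theorem pvBucketFillCount (vs : List Int) : ∀ (b : List Int) (j : Nat),
    (∀ v ∈ vs, 1 ≤ v ∧ v.toNat < b.length) → 1 ≤ j →
    (pvBucketFill vs b).getD j 0 = b.getD j 0 + (vs.count ((j : Nat) : Int) : Int) := by
  induction vs with
  | nil => intro b j _ _; simp [pvBucketFill]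
  | cons v t ih =>
    intro b j hv hj
    have hv1 := hv v (by simp)
    rw [pvBucketFill, ih _ j (fun w hw => by
          have := hv w (by simp [hw]); simpa using this) hj]
    have hcnt : (v :: t).count ((j : Nat) : Int) = t.count ((j : Nat) : Int) + (if v = ((j : Nat) : Int) then 1 else 0) := by
      rw [List.count_cons]
      simp only [beq_iff_eq]
    rw [hcnt]
    by_cases hvj : v.toNat = j
    · have hveq : v = ((j : Nat) : Int) := by omega
      rw [if_pos hveq, hvj, pvGetDSetSelf b j _ (by omega)]
      push_cast
      ring
    · rw [if_neg (by omega), pvGetDSetNe b v.toNat j _ hvj]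
      push_cast
      ring

theorem pvL3 (len : Nat) : ∀ (lo : Nat) (u m : Int) (bucket vals : List Int),
    1 ≤ lo →
    (∀ j : Nat, lo ≤ j → j < lo + len → bucket.getD j 0 = (vals.count ((j : Nat) : Int) : Int)) →
    ((pvCanon lo len vals).foldl pvStep (u, m)).1
      = pvBuyLoop ((List.range' lo len).map (Nat.cast : Nat → Int)) bucket u m := by
  induction len with
  | zero => intro lo u m bucket vals _ _; simp [pvCanon, pvBuyLoop]
  | succ len ih =>
    intro lo u m bucket vals hlo hb
    rw [List.range'_succ, List.map_cons]
    have hcanon : pvCanon lo (len + 1) vals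
        = List.replicate (vals.count ((lo : Nat) : Int)) ((lo : Nat) : Int) ++ pvCanon (lo + 1) len vals := by
      rw [pvCanon, List.range'_succ, List.flatMap_cons]
      rw [pvCanon]
    by_cases hbm : ((lo : Nat) : Int) > m
    · have hall : (pvCanon lo (len + 1) vals).foldl pvStep (u, m) = (u, m) :=
        pvStep_id _ u m (fun f hf => by have := pvMemCanon _ _ _ _ hf; omega)
      rw [hall]
      simp only [pvBuyLoop]
      rw [if_pos hbm]
    · rw [not_lt] at hbm
      have hm0 : (0 : Int) ≤ m := by
        have h1 : (1 : Int) ≤ (lo : Int) := by exact_mod_cast hlo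
        omega
      rw [hcanon, pvL2 ((lo : Nat) : Int) (by exact_mod_cast hlo) _ _ u m hm0]
      simp only [pvBuyLoop]
      rw [if_neg (by omega)]
      have hfd : PySem.Int.floordiv m ((lo : Nat) : Int) = m / ((lo : Nat) : Int) :=
        PySem.Int.floordiv_eq_ediv_of_pos (by exact_mod_cast hlo)
      have hbl : ((lo : Nat) : Int).toNat = lo := by omega
      have hbk : List.getD bucket ((lo : Nat) : Int).toNat 0 = (vals.count ((lo : Nat) : Int) : Int) := by
        rw [hbl]; exact hb lo le_rfl (by omega)
      rw [hfd, hbk]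
      exact ih (lo + 1)
        (u - min ((vals.count ((lo : Nat) : Int) : Int)) (m / ((lo : Nat) : Int)))
        (m - min ((vals.count ((lo : Nat) : Int) : Int)) (m / ((lo : Nat) : Int)) * ((lo : Nat) : Int))
        bucket vals (by omega)
        (fun j h1 h2 => hb j (by omega) (by omega))

theorem pvRangeMap (n : Nat) :
    PySem.List.pyRange 1 ((n : Int) + 1) 1 = (List.range' 1 n).map (Nat.cast : Nat → Int) := by
  rw [PySem.List.pyRange_one, show ((n : Int) + 1 - 1).toNat = n from by omega,
      List.range'_eq_map_range, List.map_map]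
  apply List.map_congr_left
  intro a _
  simp [Function.comp]

-- ===== VERDICT (by name: the statement is the Claim_ definition above) =====
theorem deleteProducts_spec : Claim_equal_deleteProducts := by
  intro ids m _
  unfold Spec_deleteProducts deleteProducts deleteProducts_alt
  simp only []
  have hcounter : ids.foldl (fun d num => d.modify num 0 (· + 1)) (PySem.Dict.empty : PySem.Dict Int Int)
      = PySem.Dict.counter ids := (PySem.Dict.counter_eq_foldl ids).symm
  rw [hcounter]
  have hfreq : (PySem.Dict.counter ids).items.foldl (fun acc kv => acc ++ [kv.2]) []
      = (PySem.Dict.counter ids).values := by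
    rw [pvFoldlAppendSnd]
    simp [PySem.Dict.values]
  rw [hfreq]
  have hv : ∀ v ∈ (PySem.Dict.counter ids).values, 1 ≤ v ∧ v ≤ (ids.length : Int) := by
    intro v hvv
    simp only [PySem.Dict.values, PySem.Dict.items_counter, List.map_map, List.mem_map,
      Function.comp] at hvv
    obtain ⟨k, hk, hkv⟩ := hvv
    have hkmem : k ∈ ids := by rwa [PySem.Set.mem_ofList] at hk
    constructor
    · rw [← hkv]
      exact_mod_cast List.count_pos_iff.mpr hkmem
    · rw [← hkv]
      exact_mod_cast List.count_le_length
  have hsorted : PySem.List.sorted (PySem.Dict.counter ids).values (fun x => x) false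
      = pvCanon 1 ids.length (PySem.Dict.counter ids).values :=
    pvSortedEqCanon ids.length _ hv
  rw [hsorted]
  rw [PySem.List.foldl_pyRange_zero_pyGetD' (pvCanon 1 ids.length (PySem.Dict.counter ids).values) 0
      (fun st f => if st.2 ≥ f then (st.1 - 1, st.2 - f) else st)
      (((PySem.Dict.counter ids).size : Int), m)]
  have hstep : (fun (st : Int × Int) f => if st.2 ≥ f then (st.1 - 1, st.2 - f) else st) = pvStep := rfl
  rw [hstep, pvRangeMap]
  apply pvL3 ids.length 1 ((PySem.Dict.counter ids).size) m
    (pvBucketFill (PySem.Dict.counter ids).values (List.replicate (ids.length + 1) 0))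
    (PySem.Dict.counter ids).values le_rfl
  intro j h1 h2
  rw [pvBucketFillCount (PySem.Dict.counter ids).values _ j
        (fun v hvv => by
          have := hv v hvv
          refine ⟨this.1, ?_⟩
          rw [List.length_replicate]
          omega)
        h1]
  have hz : (List.replicate (ids.length + 1) (0 : Int)).getD j 0 = 0 := by
    rw [List.getD_eq_getElem?_getD, List.getElem?_replicate]
    split_ifs <;> rfl
  rw [hz]
  ring
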